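-- pv_equiv track=rewrite | github.com/hebelmx/Veriqan | Prisma/scripts/test_project_config_audit.py | locate_line
-- ===== SOURCE A (Python) =====
-- from typing import Iterable, List, Optional
--
-- def locate_line(lines: List[str], needles: Iterable[str]) -> Optional[int]:
--     """Return the (1-based) line number containing any of the provided needles."""
--     lowercase_needles = [needle.lower() for needle in needles]
--     for idx, line in enumerate(lines, start=1):
--         lower_line = line.lower()
--         for needle in lowercase_needles:
--             if needle in lower_line:
--                 return idx
--     return None
-- ===== SOURCE B (Python) =====
-- from typing import Iterable, List, Optional
--
-- def locate_line(lines: List[str], needles: Iterable[str]) -> Optional[int]: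
--     """Return the (1-based) line number containing any of the provided needles."""
--     best = None
--     for needle in needles:
--         nl = needle.lower()
--         idx = next((i for i, line in enumerate(lines, 1) if nl in line.lower()), None)
--         if idx is not None:
--             best = idx if best is None else min(best, idx)
--     return best
-- ===== Notes on version B (the rewrite author's own statement) =====
-- stated objective: alternative
-- what changed: Needle-major traversal: for each needle compute the first matching line index, then take the minimum over needles, instead of A's line-major scan testing every needle per line.
import Mathlib
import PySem

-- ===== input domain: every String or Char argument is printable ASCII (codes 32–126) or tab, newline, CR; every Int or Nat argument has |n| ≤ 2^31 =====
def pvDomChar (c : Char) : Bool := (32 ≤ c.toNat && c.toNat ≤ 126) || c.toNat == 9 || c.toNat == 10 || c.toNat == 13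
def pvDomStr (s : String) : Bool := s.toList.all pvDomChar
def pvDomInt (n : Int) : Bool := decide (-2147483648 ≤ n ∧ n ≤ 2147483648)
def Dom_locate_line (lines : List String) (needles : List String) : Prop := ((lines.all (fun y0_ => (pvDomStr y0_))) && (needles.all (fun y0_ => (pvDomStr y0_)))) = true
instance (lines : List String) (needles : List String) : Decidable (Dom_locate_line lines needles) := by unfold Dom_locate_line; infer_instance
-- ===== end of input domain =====

-- B rewrites A's line-major scan (every needle tested per line) as a needle-major scan:
-- first matching line per needle, then the minimum over needles. Same cost, different traversal.

-- ===== PORT A =====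
-- the 'for idx, line in enumerate(lines, start=1)' loop; the inner 'for needle in lows: if needle in lower_line: return idx' is List.any
def lineScanA (lows : List String) : List String → Int → Option Int
  | [], _ => none
  | l :: ls, idx =>
    if lows.any (fun n => PySem.Str.isIn n (PySem.Str.lower l)) then some idx
    else lineScanA lows ls (idx + 1)

def locate_line (lines : List String) (needles : List String) : Option Int :=
  let lowercase_needles := needles.map (fun n => PySem.Str.lower n)
  lineScanA lowercase_needles lines 1

-- ===== PORT B =====
-- 'next((i for i, line in enumerate(lines, 1) if nl in line.lower()), None)'
def firstHit (nl : String) : List String → Int → Option Int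
  | [], _ => none
  | l :: ls, i => if PySem.Str.isIn nl (PySem.Str.lower l) then some i else firstHit nl ls (i + 1)

-- 'if idx is not None: best = idx if best is None else min(best, idx)'
def mergeBest (best : Option Int) (idx : Option Int) : Option Int :=
  match idx with
  | none => best
  | some k =>
    match best with
    | none => some k
    | some b => some (min b k)

def locate_line_alt (lines : List String) (needles : List String) : Option Int :=
  needles.foldl (fun best needle => mergeBest best (firstHit (PySem.Str.lower needle) lines 1)) none

-- ===== PRECONDITION & SPEC =====
def Spec_locate_line (lines : List String) (needles : List String) (out : Option Int) : Prop := out = locate_line_alt lines needles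
instance (lines : List String) (needles : List String) (out : Option Int) : Decidable (Spec_locate_line lines needles out) := by unfold Spec_locate_line; infer_instance

-- ===== CLAIM (what is proved, stated in full; the proofs are below) =====
def Claim_equal_locate_line : Prop := ∀ (lines : List String) (needles : List String), Dom_locate_line lines needles → Spec_locate_line lines needles (locate_line lines needles)

-- ===== LEMMAS AND PROOFS =====

theorem firstHit_ge (nl : String) (ls : List String) (i k : Int)
    (h : firstHit nl ls i = some k) : i ≤ k := by
  induction ls generalizing i with
  | nil => simp [firstHit] at h
  | cons l ls ih =>
    simp only [firstHit] at h
    split at h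
    · cases h; omega
    · have := ih (i + 1) h; omega

-- fold of mergeBest over a list of options, all of which are none: stays at the accumulator
theorem fold_merge_all_none (needles : List String) (v : String → Option Int) (acc : Option Int)
    (h : ∀ n ∈ needles, v n = none) :
    needles.foldl (fun best n => mergeBest best (v n)) acc = acc := by
  induction needles generalizing acc with
  | nil => rfl
  | cons n ns ih =>
    simp only [List.foldl_cons, h n (by simp)]
    exact (by simpa [mergeBest] using ih acc (fun m hm => h m (by simp [hm])))

-- fold congruence when the per-needle values agree on members
theorem fold_merge_congr (needles : List String) (v w : String → Option Int) (acc : Option Int)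
    (h : ∀ n ∈ needles, v n = w n) :
    needles.foldl (fun best n => mergeBest best (v n)) acc
      = needles.foldl (fun best n => mergeBest best (w n)) acc := by
  induction needles generalizing acc with
  | nil => rfl
  | cons n ns ih =>
    simp only [List.foldl_cons, h n (by simp)]
    exact ih _ (fun m hm => h m (by simp [hm]))

-- if every value is ≥ i (when some) and some needle yields exactly some i, the fold gives some i
theorem fold_merge_min (needles : List String) (v : String → Option Int) (i : Int)
    (acc : Option Int)
    (hacc : acc = none ∨ ∃ b, acc = some b ∧ i ≤ b)
    (hlb : ∀ n ∈ needles, ∀ k, v n = some k → i ≤ k)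
    (hex : (∃ n ∈ needles, v n = some i) ∨ acc = some i) :
    needles.foldl (fun best n => mergeBest best (v n)) acc = some i := by
  induction needles generalizing acc with
  | nil =>
    rcases hex with ⟨n, hn, _⟩ | h
    · simp at hn
    · simpa using h
  | cons n ns ih =>
    simp only [List.foldl_cons]
    have hlb' : ∀ m ∈ ns, ∀ k, v m = some k → i ≤ k := fun m hm => hlb m (by simp [hm])
    have hstep : (mergeBest acc (v n) = none ∨ ∃ b, mergeBest acc (v n) = some b ∧ i ≤ b) := by
      cases hv : v n with
      | none => simpa [mergeBest, hv] using hacc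
      | some k =>
        have hk : i ≤ k := hlb n (by simp) k hv
        rcases hacc with h0 | ⟨b, hb, hib⟩
        · right; exact ⟨k, by simp [mergeBest, h0], hk⟩
        · right; exact ⟨min b k, by simp [mergeBest, hb], le_min hib hk⟩
    rcases hex with ⟨m, hm, hvm⟩ | hi
    · rcases List.mem_cons.mp hm with rfl | hm'
      · -- this needle hits some i: accumulator becomes some i and stays there
        apply ih (mergeBest acc (v m)) _ hlb'
        · right
          rcases hacc with h0 | ⟨b, hb, hib⟩
          · simp [mergeBest, hvm, h0]
          · simp [mergeBest, hvm, hb]; omega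
        · rcases hacc with h0 | ⟨b, hb, hib⟩
          · simp [mergeBest, hvm, h0]
          · simp [mergeBest, hvm, hb]; omega
      · exact ih _ hstep hlb' (Or.inl ⟨m, hm', hvm⟩)
    · -- accumulator already some i: it stays some i through mergeBest
      apply ih (mergeBest acc (v n)) hstep hlb'
      right
      cases hv : v n with
      | none => simp [mergeBest, hi]
      | some k =>
        have hk : i ≤ k := hlb n (by simp) k hv
        simp [mergeBest, hi]; omega

-- the heart: B's needle-major fold equals A's line-major scan, for any start index
theorem main_lemma (needles : List String) (lines : List String) (i : Int) :
    needles.foldl (fun best n => mergeBest best (firstHit (PySem.Str.lower n) lines i)) none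
      = lineScanA (needles.map (fun n => PySem.Str.lower n)) lines i := by
  induction lines generalizing i with
  | nil =>
    simp only [lineScanA]
    exact fold_merge_all_none _ _ _ (fun n _ => rfl)
  | cons l ls ih =>
    simp only [lineScanA, List.any_map]
    by_cases hc : needles.any ((fun n => PySem.Str.isIn n (PySem.Str.lower l)) ∘ fun n => PySem.Str.lower n) = true
    · rw [if_pos hc]
      obtain ⟨n, hn, hhit⟩ := List.any_eq_true.mp hc
      apply fold_merge_min _ _ i none (Or.inl rfl)
      · intro m _ k hk
        simp only [firstHit] at hk
        split at hk
        · cases hk; omega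
        · have := firstHit_ge _ _ _ _ hk; omega
      · refine Or.inl ⟨n, hn, ?_⟩
        simp only [Function.comp_apply] at hhit
        simp only [firstHit]
        rw [if_pos hhit]
    · rw [if_neg hc]
      rw [← ih (i + 1)]
      apply fold_merge_congr
      intro n hn
      have hno : PySem.Str.isIn (PySem.Str.lower n) (PySem.Str.lower l) = false := by
        rcases Bool.eq_false_or_eq_true (PySem.Str.isIn (PySem.Str.lower n) (PySem.Str.lower l)) with h | h
        · exact absurd (List.any_eq_true.mpr ⟨n, hn, h⟩) hc
        · exact h
      simp only [firstHit]
      rw [hno]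
      simp

-- ===== VERDICT (by name: the statement is the Claim_ definition above) =====
theorem locate_line_spec : Claim_equal_locate_line := by
  intro lines needles _
  unfold Spec_locate_line locate_line locate_line_alt
  exact (main_lemma needles lines 1).symm
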